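-- pv_equiv track=rewrite | github.com/kmatotek/kattisTesting | auto_miningTesting2/kayaking/submissions/1.py | max_kayak_speed
-- ===== SOURCE A (Python) =====
-- def max_kayak_speed(b, n, e, sb, sn, se, cs):
--     cs.sort()
--     strengths = [sb]*b + [sn]*n + [se]*e
--     strengths.sort()
--     result = []
--
--     while strengths:
--         if len(strengths) == 1:
--             result.append(cs.pop() * strengths.pop())
--         else:
--             max_strength = strengths.pop()
--             min_strength = strengths.pop(0)
--             result.append(cs.pop() * (max_strength + min_strength))
--
--     return min(result)
-- ===== SOURCE B (Python) =====
-- def max_kayak_speed(b, n, e, sb, sn, se, cs):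
--     strengths = sorted([sb] * b + [sn] * n + [se] * e)
--     order = sorted(cs)
--     i, j, k = 0, len(strengths) - 1, len(order) - 1
--     best = None
--     while i <= j:
--         s = strengths[j] if i == j else strengths[i] + strengths[j]
--         v = order[k] * s
--         if best is None or v < best:
--             best = v
--         i, j, k = i + 1, j - 1, k - 1
--     return best
-- ===== Notes on version B (the rewrite author's own statement) =====
-- stated objective: faster
-- what changed: B replaces A's destructive pop()/pop(0) loop over shrinking list copies by two index pointers moving inward over the sorted strengths (with a third index walking the sorted costs from the end) and a running minimum, removing the O(n) pop(0) shifts and the result list.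
import Mathlib
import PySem

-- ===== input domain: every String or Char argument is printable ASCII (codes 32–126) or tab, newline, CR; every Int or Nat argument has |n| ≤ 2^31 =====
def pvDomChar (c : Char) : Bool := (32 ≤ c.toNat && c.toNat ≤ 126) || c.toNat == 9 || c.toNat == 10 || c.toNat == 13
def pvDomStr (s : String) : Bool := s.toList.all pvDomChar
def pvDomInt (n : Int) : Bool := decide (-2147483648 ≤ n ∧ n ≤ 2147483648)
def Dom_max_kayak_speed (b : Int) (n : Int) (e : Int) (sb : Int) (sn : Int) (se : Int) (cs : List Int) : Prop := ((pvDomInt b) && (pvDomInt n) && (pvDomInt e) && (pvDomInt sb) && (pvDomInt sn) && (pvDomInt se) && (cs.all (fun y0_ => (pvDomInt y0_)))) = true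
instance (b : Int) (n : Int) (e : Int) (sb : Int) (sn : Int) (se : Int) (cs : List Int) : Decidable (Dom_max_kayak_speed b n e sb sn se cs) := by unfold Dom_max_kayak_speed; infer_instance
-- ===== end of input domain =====

-- B replaces A's pop()/pop(0) destructive loop by two inward-moving index pointers with a running
-- minimum (faster: no O(n) pop(0) shifts). A sorts and pops cs IN PLACE; B does not mutate its
-- arguments — the equivalence proved here is about the RETURN value only.

-- ===== PORT A =====
-- the while loop of A: state = (strengths, cs, result); pop() = getLast, pop(0) = head
def loopA : List Int → List Int → List Int → List Int
  | [], _, result => result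
  | [s], cs, result => result ++ [(cs.getLast?.getD 0) * s]
  | s0 :: s1 :: rest, cs, result =>
      loopA ((s1 :: rest).dropLast) cs.dropLast
        (result ++ [(cs.getLast?.getD 0) * (((s1 :: rest).getLast?.getD 0) + s0)])
  termination_by s _ _ => s.length
  decreasing_by simp [List.length_dropLast]

def max_kayak_speed (b : Int) (n : Int) (e : Int) (sb : Int) (sn : Int) (se : Int) (cs : List Int) : Int :=
  let cs1 := PySem.List.sorted cs (fun x => x) false
  let strengths := List.replicate b.toNat sb ++ List.replicate n.toNat sn ++ List.replicate e.toNat se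
  let strengths1 := PySem.List.sorted strengths (fun x => x) false
  (PySem.List.min? (loopA strengths1 cs1 []) (fun x => x)).getD 0

-- ===== PORT B =====
-- the while loop of B: two pointers i, j into strengths, k into order, running minimum `best`
def loopB (strengths order : List Int) (i j k : Int) (best : Option Int) : Option Int :=
  if _h : i ≤ j then
    let s := if i == j then (PySem.List.pyGet? strengths j).getD 0
             else (PySem.List.pyGet? strengths i).getD 0 + (PySem.List.pyGet? strengths j).getD 0
    let v := ((PySem.List.pyGet? order k).getD 0) * s
    let best' := match best with
      | none => some v
      | some b0 => if v < b0 then some v else some b0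
    loopB strengths order (i + 1) (j - 1) (k - 1) best'
  else best
  termination_by (j + 1 - i).toNat
  decreasing_by omega

def max_kayak_speed_alt (b : Int) (n : Int) (e : Int) (sb : Int) (sn : Int) (se : Int) (cs : List Int) : Int :=
  let strengths := PySem.List.sorted (List.replicate b.toNat sb ++ List.replicate n.toNat sn ++ List.replicate e.toNat se) (fun x => x) false
  let order := PySem.List.sorted cs (fun x => x) false
  (loopB strengths order 0 ((strengths.length : Int) - 1) ((order.length : Int) - 1) none).getD 0

-- ===== PRECONDITION & SPEC =====
-- Pre_ excludes exactly the inputs on which A raises: no paddlers at all (min([]) is a ValueError)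
-- or fewer kayaks than the ceil(m/2) pops the loop performs (cs.pop() on empty is an IndexError).
def Pre_max_kayak_speed (b : Int) (n : Int) (e : Int) (sb : Int) (sn : Int) (se : Int) (cs : List Int) : Prop :=
  0 < b.toNat + n.toNat + e.toNat ∧ (b.toNat + n.toNat + e.toNat + 1) / 2 ≤ cs.length
instance (b : Int) (n : Int) (e : Int) (sb : Int) (sn : Int) (se : Int) (cs : List Int) : Decidable (Pre_max_kayak_speed b n e sb sn se cs) := by unfold Pre_max_kayak_speed; infer_instance

def pvWitness_max_kayak_speed : Int × Int × Int × Int × Int × Int × List Int := (1, 1, 1, 2, 5, 9, [3, 1])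

def Spec_max_kayak_speed (b : Int) (n : Int) (e : Int) (sb : Int) (sn : Int) (se : Int) (cs : List Int) (out : Int) : Prop := out = max_kayak_speed_alt b n e sb sn se cs
instance (b : Int) (n : Int) (e : Int) (sb : Int) (sn : Int) (se : Int) (cs : List Int) (out : Int) : Decidable (Spec_max_kayak_speed b n e sb sn se cs out) := by unfold Spec_max_kayak_speed; infer_instance

-- ===== CLAIM (what is proved, stated in full; the proofs are below) =====
def Claim_equal_max_kayak_speed : Prop := ∀ (b : Int) (n : Int) (e : Int) (sb : Int) (sn : Int) (se : Int) (cs : List Int), Dom_max_kayak_speed b n e sb sn se cs → Pre_max_kayak_speed b n e sb sn se cs → Spec_max_kayak_speed b n e sb sn se cs (max_kayak_speed b n e sb sn se cs)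

-- ===== LEMMAS AND PROOFS =====

def prodsA : List Int → List Int → List Int
  | [], _ => []
  | [s], cs => [(cs.getLast?.getD 0) * s]
  | s0 :: s1 :: rest, cs =>
      ((cs.getLast?.getD 0) * (((s1 :: rest).getLast?.getD 0) + s0))
        :: prodsA ((s1 :: rest).dropLast) cs.dropLast
  termination_by s _ => s.length
  decreasing_by simp [List.length_dropLast]

def minStep (best : Option Int) (v : Int) : Option Int :=
  match best with
  | none => some v
  | some b0 => if v < b0 then some v else some b0

theorem window_getElem? (S : List Int) (m p q : Nat) (h : p + q < m) :
    ((S.take m).drop p)[q]? = S[p+q]? := by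
  simp [List.getElem?_drop, h]

theorem take_getLast (O : List Int) (m : Nat) (h0 : 0 < m) (h : m ≤ O.length) :
    (O.take m).getLast? = O[m-1]? := by
  have h1 : (O.take m).length = m := by simp; omega
  rw [List.getLast?_eq_getElem?, h1, List.getElem?_take]
  simp [show m - 1 < m by omega]

theorem dropLast_take' (O : List Int) (m : Nat) (h : m ≤ O.length) :
    (O.take m).dropLast = O.take (m-1) := by
  rw [List.dropLast_eq_take, List.take_take, List.length_take]
  congr 1
  omega

theorem loopB_eq_fold_aux : ∀ (N : Nat) (w S O : List Int) (i j k : Int) (best : Option Int),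
    w.length ≤ N →
    w = (S.take (j + 1).toNat).drop i.toNat →
    0 ≤ i → i ≤ j + 1 → j < (S.length : Int) →
    k < (O.length : Int) → (w.length + 1) / 2 ≤ (k + 1).toNat →
    loopB S O i j k best = (prodsA w (O.take (k + 1).toNat)).foldl minStep best := by
  intro N
  induction N using Nat.strong_induction_on with
  | _ N IH =>
    intro w S O i j k best hN hw hi0 hij1 hjS hkO hk
    have hlen : w.length = (j+1).toNat - i.toNat := by
      rw [hw]; simp [List.length_drop, List.length_take]; omega
    by_cases hij : i ≤ j
    · -- loop body runs
      rw [loopB]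
      simp only [dif_pos hij]
      have hj0 : 0 ≤ j := le_trans hi0 hij
      have hkk : 0 ≤ k := by omega
      have hSj : (PySem.List.pyGet? S j).getD 0 = S.getD j.toNat 0 := by
        rw [PySem.List.pyGet?_of_nonneg (h := hj0)]; simp [List.getD]
      have hSi : (PySem.List.pyGet? S i).getD 0 = S.getD i.toNat 0 := by
        rw [PySem.List.pyGet?_of_nonneg (h := hi0)]; simp [List.getD]
      have hOk : (PySem.List.pyGet? O k).getD 0 = O.getD k.toNat 0 := by
        rw [PySem.List.pyGet?_of_nonneg (h := hkk)]; simp [List.getD]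
      have hCL : (O.take (k+1).toNat).getLast?.getD 0 = O.getD k.toNat 0 := by
        rw [take_getLast O (k+1).toNat (by omega) (by omega)]
        have h2 : (k+1).toNat - 1 = k.toNat := by omega
        rw [h2]; simp [List.getD]
      by_cases heq : i = j
      · -- single middle element
        have hw1 : w.length = 1 := by omega
        obtain ⟨s, hws⟩ := List.length_eq_one_iff.mp hw1
        have hsv : s = S.getD j.toNat 0 := by
          have h0 : w[0]? = some s := by rw [hws]; rfl
          rw [hw, window_getElem? S _ _ _ (by omega)] at h0
          have h3 : i.toNat + 0 = j.toNat := by omega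
          rw [h3] at h0
          simp [List.getD, h0]
        rw [loopB]
        have hstop : ¬ (i + 1 ≤ j - 1) := by omega
        simp only [dif_neg hstop]
        rw [hws]
        simp only [prodsA, List.foldl_cons, List.foldl_nil]
        rw [hCL, hsv]
        simp only [heq, BEq.rfl, if_true, hSj]
        rw [hOk]
        rfl
      · -- two elements popped
        have hw2 : 2 ≤ w.length := by omega
        match w, hw2 with
        | a :: b :: rest, _ =>
        have hav : a = S.getD i.toNat 0 := by
          have h0 : (a :: b :: rest)[0]? = some a := rfl
          rw [hw, window_getElem? S _ _ _ (by omega)] at h0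
          have h3 : i.toNat + 0 = i.toNat := by omega
          rw [h3] at h0
          simp [List.getD, h0]
        have hlast : (b :: rest).getLast?.getD 0 = S.getD j.toNat 0 := by
          have h0 : (a :: b :: rest).getLast? = (b :: rest).getLast? := by
            simp [List.getLast?_cons_cons]
          have h1 : (a :: b :: rest)[(a :: b :: rest).length - 1]? = (a :: b :: rest).getLast? := by
            rw [List.getLast?_eq_getElem?]
          rw [hw] at h1
          rw [window_getElem? S _ _ _
            (by simp [List.length_drop, List.length_take]; omega)] at h1
          have hidx : i.toNat + ((List.drop i.toNat (List.take (j+1).toNat S)).length - 1)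
              = j.toNat := by
            simp [List.length_drop, List.length_take]; omega
          rw [hidx] at h1
          rw [← hw, h0] at h1
          simp [List.getD, ← h1]
        -- new window
        have hneww : (b :: rest).dropLast = (S.take ((j-1) + 1).toNat).drop (i+1).toNat := by
          have ht : (b :: rest) = ((S.take (j+1).toNat).drop i.toNat).tail := by
            rw [← hw]; rfl
          rw [ht, List.tail_drop, List.drop_take,
              dropLast_take' _ _ (by simp [List.length_drop]; omega)]
          conv_rhs => rw [List.drop_take]
          have e1 : (i+1).toNat = i.toNat + 1 := by omega
          rw [e1]
          congr 1
          omega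
        have hnewC : (O.take (k+1).toNat).dropLast = O.take ((k-1)+1).toNat := by
          rw [dropLast_take' _ _ (by omega)]
          congr 1
          omega
        rw [prodsA]
        simp only [List.foldl_cons]
        have hne : (i == j) = false := by simp [heq]
        simp only [hne, Bool.false_eq_true, if_false, hSi, hSj, hOk]
        rw [IH ((a :: b :: rest).length - 2) (by omega) (b :: rest).dropLast S O (i+1) (j-1) (k-1)
            _ (by simp [List.length_dropLast]) hneww (by omega) (by omega) (by omega) (by omega)
            (by simp only [List.length_dropLast, List.length_cons] at hk ⊢; omega)]
        rw [hnewC, hCL, hlast, hav]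
        have hcomm : O.getD k.toNat 0 * (S.getD j.toNat 0 + S.getD i.toNat 0)
            = O.getD k.toNat 0 * (S.getD i.toNat 0 + S.getD j.toNat 0) := by ring
        rw [hcomm]
        rfl
    · -- loop does not run
      rw [loopB]
      simp only [dif_neg hij]
      have hwnil : w = [] := by
        have : w.length = 0 := by omega
        exact List.length_eq_zero_iff.mp this
      rw [hwnil]
      simp [prodsA]

theorem loopA_eq_prodsA : ∀ (s cs r : List Int), loopA s cs r = r ++ prodsA s cs := by
  intro s cs r
  fun_induction loopA s cs r with
  | case1 => simp [prodsA]
  | case2 => simp [prodsA]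
  | case3 s0 s1 rest cs r ih => simp [prodsA, ih]

theorem prodsA_ne_nil (s cs : List Int) (h : s ≠ []) : prodsA s cs ≠ [] := by
  match s, h with
  | [x], _ => rw [prodsA]; simp
  | x :: y :: rest, _ => rw [prodsA]; simp

theorem foldl_minStep_some : ∀ (l : List Int) (x : Int),
    l.foldl minStep (some x) = some (l.foldl min x) := by
  intro l
  induction l with
  | nil => intro x; simp
  | cons a t ih =>
    intro x
    have h1 : minStep (some x) a = some (min x a) := by
      simp only [minStep]
      rcases lt_or_ge a x with h | h
      · simp [h, le_of_lt h]
      · simp [not_lt.mpr h, h]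
    simp only [List.foldl_cons, h1, ih]

theorem foldl_minStep_min? : ∀ (l : List Int), l ≠ [] →
    l.foldl minStep none = PySem.List.min? l (fun x => x) := by
  intro l hl
  cases l with
  | nil => simp at hl
  | cons x t =>
    rw [PySem.List.min?_id_cons]
    simp only [List.foldl_cons]
    show t.foldl minStep (minStep none x) = _
    simp only [minStep]
    exact foldl_minStep_some t x

-- ===== VERDICT (by name: the statement is the Claim_ definition above) =====
theorem max_kayak_speed_spec : Claim_equal_max_kayak_speed := by
  unfold Claim_equal_max_kayak_speed Spec_max_kayak_speed Pre_max_kayak_speed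
  intro b n e sb sn se cs _hD hPre
  simp only [max_kayak_speed, max_kayak_speed_alt]
  set S := PySem.List.sorted (List.replicate b.toNat sb ++ List.replicate n.toNat sn ++ List.replicate e.toNat se) (fun x => x) false with hS
  set O := PySem.List.sorted cs (fun x => x) false with hO
  have hSlen : S.length = b.toNat + n.toNat + e.toNat := by
    rw [hS, PySem.List.length_sorted]; simp [Nat.add_assoc]
  have hOlen : O.length = cs.length := by rw [hO, PySem.List.length_sorted]
  have hS0 : 0 < S.length := by omega
  have hO0 : 0 < O.length := by omega
  have hOt : (((O.length : Int) - 1) + 1).toNat = O.length := by omega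
  rw [loopA_eq_prodsA, List.nil_append]
  rw [loopB_eq_fold_aux S.length S S O 0 ((S.length : Int) - 1) ((O.length : Int) - 1) none
      le_rfl
      (by have : (((S.length : Int) - 1) + 1).toNat = S.length := by omega
          rw [this]; simp)
      le_rfl (by omega) (by omega) (by omega)
      (by rw [hOt]; omega)]
  rw [hOt, List.take_length]
  rw [foldl_minStep_min? _ (prodsA_ne_nil S O (by intro hnil; rw [hnil] at hS0; simp at hS0))]
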